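-- pv_equiv track=rewrite | github.com/notmike101/google-foobar | queue_to_do.py | answer
-- ===== SOURCE A (Python) =====
-- def xorOfFactoral(num):
--     if num == 0:
--         return 0
--
--     remainder = num % 4
--     if remainder == 0:
--         return num
--     elif remainder == 1:
--         return 1
--     elif remainder == 2:
--         return num + 1
--     else:
--         return 0
--
-- def xorOfRange(start,end):
--     retVal = xorOfFactoral(end) ^ xorOfFactoral(start-1)
--     return retVal
--
-- def answer(start,length):
--     currentIterPoint = start
--     maxLineLen = length * length
--     totalXor = 0
--     skip = 0
--     while length > 0:
--         length -= 1
--         totalXor ^= xorOfRange(currentIterPoint+skip,currentIterPoint+length+skip)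
--         currentIterPoint += length + skip
--         skip += 1
--
--     return totalXor
-- ===== SOURCE B (Python) =====
-- def answer(start, length):
--     if length <= 0:
--         return 0
--
--     def g(n):
--         # XOR of all integers from 0 through n (any sign, Python semantics)
--         return (n, 1, n + 1, 0)[n % 4]
--
--     # XOR of the whole length x length block of ids ...
--     total = g(start + length * length - 1) ^ g(start - 1)
--     # ... then strip, per row, the j excluded trailing cells of row j
--     for j in range(length):
--         row_end = start + (j + 1) * length
--         total ^= g(row_end - 1) ^ g(row_end - j - 1)
--     return total
-- ===== Notes on version B (the rewrite author's own statement) =====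
-- stated objective: alternative
-- what changed: Instead of A's per-row range-XOR accumulation driven by a running cursor (currentIterPoint) and skip counter, B XORs the whole length-by-length block of ids in one closed-form step and then strips off, per row, the closed-form XOR of that row's j excluded trailing cells.
import Mathlib
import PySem

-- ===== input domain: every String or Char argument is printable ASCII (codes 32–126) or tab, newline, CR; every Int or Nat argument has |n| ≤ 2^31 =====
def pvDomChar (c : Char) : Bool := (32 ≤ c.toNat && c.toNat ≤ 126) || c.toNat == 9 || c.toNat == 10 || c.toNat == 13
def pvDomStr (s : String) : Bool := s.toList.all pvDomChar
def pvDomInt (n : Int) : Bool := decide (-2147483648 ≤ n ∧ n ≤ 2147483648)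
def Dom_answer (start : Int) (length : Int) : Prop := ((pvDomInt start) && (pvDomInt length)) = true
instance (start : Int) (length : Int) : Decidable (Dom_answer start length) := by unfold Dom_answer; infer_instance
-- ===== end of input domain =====

-- B replaces A's per-row range-XOR accumulation (running cursor + skip counter) by a complement
-- computation: one closed-form XOR of the whole length×length block, then per row the XOR of the
-- j excluded trailing cells is stripped off; same O(length) cost, different algorithm.

-- ===== PORT A =====
def xorOfFactoral (num : Int) : Int :=
  if num = 0 then 0
  else
    let remainder := PySem.Int.mod num 4
    if remainder = 0 then num
    else if remainder = 1 then 1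
    else if remainder = 2 then num + 1
    else 0

def xorOfRange (start : Int) (end_ : Int) : Int :=
  PySem.Int.bxor (xorOfFactoral end_) (xorOfFactoral (start - 1))

-- A's while-loop; fuel = number of remaining iterations (= length.toNat at entry)
def answerLoop (fuel : Nat) (currentIterPoint : Int) (length : Int) (skip : Int)
    (totalXor : Int) : Int :=
  match fuel with
  | 0 => totalXor
  | f + 1 =>
    if length > 0 then
      let length' := length - 1
      let totalXor' := PySem.Int.bxor totalXor
        (xorOfRange (currentIterPoint + skip) (currentIterPoint + length' + skip))
      answerLoop f (currentIterPoint + length' + skip) length' (skip + 1) totalXor'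
    else totalXor

def answer (start : Int) (length : Int) : Int :=
  let _maxLineLen := length * length
  answerLoop length.toNat start length 0 0

-- ===== PORT B =====
-- Source B's g(n) = (n, 1, n + 1, 0)[n % 4]: tuple indexing ported as the four cases of n % 4
def gAlt (n : Int) : Int :=
  let r := PySem.Int.mod n 4
  if r = 0 then n else if r = 1 then 1 else if r = 2 then n + 1 else 0

def answer_alt (start : Int) (length : Int) : Int :=
  if length ≤ 0 then 0
  else
    let total0 := PySem.Int.bxor (gAlt (start + length * length - 1)) (gAlt (start - 1))
    (PySem.List.pyRange 0 length 1).foldl (fun total j =>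
      let rowEnd := start + (j + 1) * length
      PySem.Int.bxor total
        (PySem.Int.bxor (gAlt (rowEnd - 1)) (gAlt (rowEnd - j - 1)))) total0

-- ===== PRECONDITION & SPEC =====
def Spec_answer (start : Int) (length : Int) (out : Int) : Prop := out = answer_alt start length
instance (start : Int) (length : Int) (out : Int) : Decidable (Spec_answer start length out) := by unfold Spec_answer; infer_instance

-- ===== CLAIM (what is proved, stated in full; the proofs are below) =====
def Claim_equal_answer : Prop := ∀ (start : Int) (length : Int), Dom_answer start length → Spec_answer start length (answer start length)

-- ===== LEMMAS AND PROOFS =====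

-- Source B's branchless table g agrees with A's helper (the num = 0 branch coincides with the table)
theorem gAlt_eq (n : Int) : gAlt n = xorOfFactoral n := by
  unfold gAlt xorOfFactoral
  by_cases h : n = 0
  · subst h; simp [PySem.Int.mod]
  · rw [if_neg h]

-- Int.negSucc/natCast characterisation of Python xor (PySem.Int.bxor)
theorem bxor_natCast_negSucc (m n : Nat) :
    PySem.Int.bxor (m : Int) (Int.negSucc n) = Int.negSucc (m ^^^ n) := by
  unfold PySem.Int.bxor
  rw [if_pos (by omega : (0:Int) ≤ (m:Int)), if_neg (by omega : ¬ ((0:Int) ≤ Int.negSucc n))]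
  have h1 : (-(Int.negSucc n) - 1).toNat = n := by omega
  rw [h1, Int.toNat_natCast, Int.negSucc_eq]
  ring

theorem bxor_negSucc_natCast (m n : Nat) :
    PySem.Int.bxor (Int.negSucc m) (n : Int) = Int.negSucc (m ^^^ n) := by
  unfold PySem.Int.bxor
  rw [if_neg (by omega : ¬ ((0:Int) ≤ Int.negSucc m)), if_pos (by omega : (0:Int) ≤ (n:Int))]
  have h1 : (-(Int.negSucc m) - 1).toNat = m := by omega
  rw [h1, Int.toNat_natCast, Int.negSucc_eq]
  ring

theorem bxor_negSucc_negSucc (m n : Nat) :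
    PySem.Int.bxor (Int.negSucc m) (Int.negSucc n) = ((m ^^^ n : Nat) : Int) := by
  unfold PySem.Int.bxor
  rw [if_neg (by omega : ¬ ((0:Int) ≤ Int.negSucc m)),
    if_neg (by omega : ¬ ((0:Int) ≤ Int.negSucc n))]
  have h1 : (-(Int.negSucc m) - 1).toNat = m := by omega
  have h2 : (-(Int.negSucc n) - 1).toNat = n := by omega
  rw [h1, h2]

theorem bxor_assoc (a b c : Int) :
    PySem.Int.bxor (PySem.Int.bxor a b) c = PySem.Int.bxor a (PySem.Int.bxor b c) := by
  cases a with
  | ofNat m => cases b with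
    | ofNat n => cases c with
      | ofNat k => simp [Int.ofNat_eq_natCast, PySem.Int.bxor_natCast, Nat.xor_assoc]
      | negSucc k => simp [Int.ofNat_eq_natCast, PySem.Int.bxor_natCast,
          bxor_natCast_negSucc, Nat.xor_assoc]
    | negSucc n => cases c with
      | ofNat k => simp [Int.ofNat_eq_natCast, PySem.Int.bxor_natCast, bxor_natCast_negSucc,
          bxor_negSucc_natCast, bxor_negSucc_negSucc, Nat.xor_assoc]
      | negSucc k => simp [Int.ofNat_eq_natCast, PySem.Int.bxor_natCast, bxor_natCast_negSucc,
          bxor_negSucc_natCast, bxor_negSucc_negSucc, Nat.xor_assoc]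
  | negSucc m => cases b with
    | ofNat n => cases c with
      | ofNat k => simp [Int.ofNat_eq_natCast, bxor_negSucc_natCast, Nat.xor_assoc]
      | negSucc k => simp [Int.ofNat_eq_natCast, PySem.Int.bxor_natCast, bxor_natCast_negSucc,
          bxor_negSucc_natCast, bxor_negSucc_negSucc, Nat.xor_assoc]
    | negSucc n => cases c with
      | ofNat k => simp [Int.ofNat_eq_natCast, PySem.Int.bxor_natCast, bxor_natCast_negSucc,
          bxor_negSucc_natCast, bxor_negSucc_negSucc, Nat.xor_assoc]
      | negSucc k => simp [Int.ofNat_eq_natCast, PySem.Int.bxor_natCast, bxor_natCast_negSucc,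
          bxor_negSucc_natCast, bxor_negSucc_negSucc, Nat.xor_assoc]

theorem bxor_zero_left (a : Int) : PySem.Int.bxor 0 a = a := by
  rw [PySem.Int.bxor_comm, PySem.Int.bxor_zero]

-- (a⊕b) ⊕ (a⊕c) = b⊕c
theorem bxor_cancel_pair (a b c : Int) :
    PySem.Int.bxor (PySem.Int.bxor a b) (PySem.Int.bxor a c) = PySem.Int.bxor b c := by
  rw [bxor_assoc, show PySem.Int.bxor b (PySem.Int.bxor a c)
      = PySem.Int.bxor a (PySem.Int.bxor b c) from by
    rw [← bxor_assoc, PySem.Int.bxor_comm b a, bxor_assoc]]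
  rw [← bxor_assoc, PySem.Int.bxor_self, bxor_zero_left]

-- the one AC identity the induction step needs: (F⊕(r⊕s)) ⊕ (q⊕r) = (F⊕(p⊕q)) ⊕ (p⊕s)
theorem bxor_step_identity (F p q r s : Int) :
    PySem.Int.bxor (PySem.Int.bxor F (PySem.Int.bxor r s)) (PySem.Int.bxor q r) =
      PySem.Int.bxor (PySem.Int.bxor F (PySem.Int.bxor p q)) (PySem.Int.bxor p s) := by
  have hL : PySem.Int.bxor (PySem.Int.bxor r s) (PySem.Int.bxor q r) = PySem.Int.bxor q s := by
    rw [PySem.Int.bxor_comm (PySem.Int.bxor r s) (PySem.Int.bxor q r),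
      PySem.Int.bxor_comm q r, bxor_cancel_pair r q s]
  have hR : PySem.Int.bxor (PySem.Int.bxor p q) (PySem.Int.bxor p s) = PySem.Int.bxor q s :=
    bxor_cancel_pair p q s
  rw [bxor_assoc F (PySem.Int.bxor r s) (PySem.Int.bxor q r), hL,
    bxor_assoc F (PySem.Int.bxor p q) (PySem.Int.bxor p s), hR]

-- pulling a fixed term out of an xor-accumulating fold
theorem foldl_bxor_init (u : Int → Int) : ∀ (l : List Int) (s t : Int),
    l.foldl (fun a j => PySem.Int.bxor a (u j)) (PySem.Int.bxor s t) =
      PySem.Int.bxor s (l.foldl (fun a j => PySem.Int.bxor a (u j)) t) := by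
  intro l
  induction l with
  | nil => intro s t; rfl
  | cons x xs ih =>
    intro s t
    simp only [List.foldl_cons]
    rw [bxor_assoc, ih]

-- A's loop, entered at row j with its cip/skip state, is the fold of its closed-form row XORs
theorem aloop_eq : ∀ (L : Nat) (start length j total : Int), (L : Int) = length - j →
    answerLoop L (start + j * (length - 1)) (length - j) j total =
      (PySem.List.pyRange j length 1).foldl (fun t jj =>
        PySem.Int.bxor t
          (xorOfRange (start + jj * length) (start + (jj + 1) * length - jj - 1))) total := by
  intro L
  induction L with
  | zero =>
    intro start length j total h
    rw [PySem.List.pyRange_one_eq_nil (by omega : length ≤ j)]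
    rfl
  | succ L ih =>
    intro start length j total h
    have hj : j < length := by push_cast at h; omega
    rw [show answerLoop (L + 1) (start + j * (length - 1)) (length - j) j total =
        answerLoop L (start + j * (length - 1) + (length - j - 1) + j) (length - j - 1) (j + 1)
          (PySem.Int.bxor total (xorOfRange (start + j * (length - 1) + j)
            (start + j * (length - 1) + (length - j - 1) + j))) from by
      simp only [answerLoop, if_pos (by omega : length - j > 0)]]
    rw [PySem.List.pyRange_one_cons hj]
    simp only [List.foldl_cons]
    rw [show start + j * (length - 1) + j = start + j * length from by ring,
      show start + j * (length - 1) + (length - j - 1) + j =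
        start + (j + 1) * length - j - 1 from by ring]
    have := ih start length (j + 1)
      (PySem.Int.bxor total
        (xorOfRange (start + j * length) (start + (j + 1) * length - j - 1)))
      (by push_cast at h ⊢; omega)
    rw [show start + (j + 1) * (length - 1) = start + (j + 1) * length - j - 1 from by ring,
      show length - (j + 1) = length - j - 1 from by ring] at this
    exact this

-- telescoping: A's fold over the first k rows = B's stripping fold plus the XOR of the
-- first k full rows (the block from start to start + k*length - 1)
theorem main_fold_eq : ∀ (k : Nat) (start length t : Int),
    (PySem.List.pyRange 0 (k : Int) 1).foldl (fun tt jj =>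
        PySem.Int.bxor tt
          (xorOfRange (start + jj * length) (start + (jj + 1) * length - jj - 1))) t =
      PySem.Int.bxor
        ((PySem.List.pyRange 0 (k : Int) 1).foldl (fun tt j =>
          PySem.Int.bxor tt
            (PySem.Int.bxor (xorOfFactoral (start + (j + 1) * length - 1))
              (xorOfFactoral (start + (j + 1) * length - j - 1)))) t)
        (PySem.Int.bxor (xorOfFactoral (start + (k : Int) * length - 1))
          (xorOfFactoral (start - 1))) := by
  intro k
  induction k with
  | zero =>
    intro start length t
    rw [show ((0 : Nat) : Int) = 0 from rfl, PySem.List.pyRange_one_eq_nil (le_refl 0)]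
    simp only [List.foldl_nil]
    rw [show start + 0 * length - 1 = start - 1 from by ring, PySem.Int.bxor_self,
      PySem.Int.bxor_zero]
  | succ k ih =>
    intro start length t
    rw [show ((k + 1 : Nat) : Int) = (k : Int) + 1 from by push_cast; ring,
      PySem.List.pyRange_one_succ_right (by positivity : (0 : Int) ≤ (k : Int))]
    simp only [List.foldl_append, List.foldl_cons, List.foldl_nil]
    rw [ih start length t]
    simp only [xorOfRange]
    exact bxor_step_identity _ (xorOfFactoral (start + ((k : Int) + 1) * length - 1))
      (xorOfFactoral (start + ((k : Int) + 1) * length - (k : Int) - 1))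
      (xorOfFactoral (start + (k : Int) * length - 1)) (xorOfFactoral (start - 1))

-- ===== VERDICT (by name: the statement is the Claim_ definition above) =====
theorem answer_spec : Claim_equal_answer := by
  intro start length _
  unfold Spec_answer answer answer_alt
  by_cases hl : length ≤ 0
  · rw [if_pos hl, show length.toNat = 0 from by omega]
    rfl
  · rw [if_neg hl]
    simp only [gAlt_eq]
    have hA := aloop_eq length.toNat start length 0 0 (by omega)
    rw [show start + 0 * (length - 1) = start from by ring,
      show length - 0 = length from by ring] at hA
    rw [hA]
    have hk : ((length.toNat : Nat) : Int) = length := Int.toNat_of_nonneg (by omega)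
    have hM := main_fold_eq length.toNat start length 0
    rw [hk] at hM
    rw [hM]
    have hP := foldl_bxor_init
      (fun j => PySem.Int.bxor (xorOfFactoral (start + (j + 1) * length - 1))
        (xorOfFactoral (start + (j + 1) * length - j - 1)))
      (PySem.List.pyRange 0 length 1)
      (PySem.Int.bxor (xorOfFactoral (start + length * length - 1)) (xorOfFactoral (start - 1)))
      0
    rw [PySem.Int.bxor_zero] at hP
    rw [hP]
    exact PySem.Int.bxor_comm _ _
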